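-- pv_equiv track=rewrite | github.com/moa2ofo/AiSwGenRepo | project/unitTestBluePrintGen.py | _find_next_semicolon_c_like
-- ===== SOURCE A (Python) =====
-- def _find_next_semicolon_c_like(s: str, start: int) -> int:
--     """Scan to the next ';' while skipping strings/comments (basic C-like)."""
--     in_str = in_chr = False
--     escape = False
--     in_line_comment = in_block_comment = False
--     j = start
--     while j < len(s):
--         c = s[j]
--
--         if in_line_comment:
--             if c == "\n":
--                 in_line_comment = False
--             j += 1
--             continue
--
--         if in_block_comment:
--             if c == "*" and j + 1 < len(s) and s[j + 1] == "/":
--                 in_block_comment = False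
--                 j += 2
--                 continue
--             j += 1
--             continue
--
--         if in_str:
--             if escape:
--                 escape = False
--             elif c == "\\":
--                 escape = True
--             elif c == '"':
--                 in_str = False
--             j += 1
--             continue
--
--         if in_chr:
--             if escape:
--                 escape = False
--             elif c == "\\":
--                 escape = True
--             elif c == "'":
--                 in_chr = False
--             j += 1
--             continue
--
--         if c == "/" and j + 1 < len(s):
--             nxt = s[j + 1]
--             if nxt == "/":
--                 in_line_comment = True
--                 j += 2
--                 continue
--             if nxt == "*":
--                 in_block_comment = True
--                 j += 2
--                 continue
--
--         if c == '"':
--             in_str = True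
--             j += 1
--             continue
--         if c == "'":
--             in_chr = True
--             j += 1
--             continue
--
--         if c == ";":
--             return j
--
--         j += 1
--
--     return -1
-- ===== SOURCE B (Python) =====
-- def _find_next_semicolon_c_like(s: str, start: int) -> int:
--     """Tokenizer version: consume whole string/char literals and comments, jump past them."""
--     n = len(s)
--     j = start
--     while j < n:
--         c = s[j]
--         if c == ';':
--             return j
--         if c == '"' or c == "'":
--             j = _skip_quoted(s, j + 1, c)
--         elif c == '/' and j + 1 < n and s[j + 1] == '/':
--             j = _skip_line_comment(s, j + 2)
--         elif c == '/' and j + 1 < n and s[j + 1] == '*':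
--             j = _skip_block_comment(s, j + 2)
--         else:
--             j += 1
--     return -1
--
--
-- def _skip_quoted(s, j, q):
--     # index just past the closing quote q (backslash escapes skipped); past the end if unterminated
--     while j < len(s):
--         if s[j] == '\\':
--             j += 2
--         elif s[j] == q:
--             return j + 1
--         else:
--             j += 1
--     return j
--
--
-- def _skip_line_comment(s, j):
--     while j < len(s) and s[j] != '\n':
--         j += 1
--     return j + 1  # consume the newline (or run off the end)
--
--
-- def _skip_block_comment(s, j):
--     while j + 1 < len(s):
--         if s[j] == '*' and s[j + 1] == '/':
--             return j + 2
--         j += 1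
--     return len(s)
-- ===== Notes on version B (the rewrite author's own statement) =====
-- stated objective: simpler
-- what changed: Replaces A's single loop over five boolean state flags (in_str/in_chr/escape/line-comment/block-comment) by a tokenizer: at each top-level position B consumes a whole string/char literal or comment with a dedicated skip helper and jumps past it, so no per-character mode flags exist.
import Mathlib
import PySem

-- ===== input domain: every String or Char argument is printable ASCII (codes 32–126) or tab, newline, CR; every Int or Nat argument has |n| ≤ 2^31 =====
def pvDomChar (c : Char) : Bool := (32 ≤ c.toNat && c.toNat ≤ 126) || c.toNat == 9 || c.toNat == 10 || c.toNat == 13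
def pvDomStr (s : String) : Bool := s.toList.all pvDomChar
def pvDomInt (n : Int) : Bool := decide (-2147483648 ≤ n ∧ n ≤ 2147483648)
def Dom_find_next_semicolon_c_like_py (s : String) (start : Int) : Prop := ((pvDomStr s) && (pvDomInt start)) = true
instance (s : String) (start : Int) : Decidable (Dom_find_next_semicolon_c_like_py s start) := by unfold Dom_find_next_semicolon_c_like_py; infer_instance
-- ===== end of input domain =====

-- B replaces A's five-flag per-character state machine by a tokenizer with dedicated skip
-- helpers that consume whole string/char literals and comments (objective: simpler).
-- Loops are ported with a fuel parameter (initial fuel = remaining length + 1, enough for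
-- every iteration, since the scan index strictly increases); fuel only makes them total.

-- ===== PORT A =====
-- literal port of A's while loop: the five booleans are explicit parameters, j steps by 1 or 2.
def goA (cs : List Char) (fuel : Nat) (j : Int) (instr inchr esc ilc ibc : Bool) : Int :=
  match fuel with
  | 0 => -1          -- never reached: fuel starts at remaining length + 1
  | fuel + 1 =>
    if j < (cs.length : Int) then
      match PySem.List.pyGet? cs j with
      | none => -1   -- Python raises IndexError here (j < -len); excluded by Pre_
      | some c =>
        if ilc then
          goA cs fuel (j + 1) instr inchr esc (!(c = '\n')) ibc
        else if ibc then
          if c = '*' ∧ j + 1 < (cs.length : Int) ∧ PySem.List.pyGet? cs (j + 1) = some '/' then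
            goA cs fuel (j + 2) instr inchr esc ilc false
          else goA cs fuel (j + 1) instr inchr esc ilc ibc
        else if instr then
          if esc then goA cs fuel (j + 1) instr inchr false ilc ibc
          else if c = '\\' then goA cs fuel (j + 1) instr inchr true ilc ibc
          else if c = '"' then goA cs fuel (j + 1) false inchr esc ilc ibc
          else goA cs fuel (j + 1) instr inchr esc ilc ibc
        else if inchr then
          if esc then goA cs fuel (j + 1) instr inchr false ilc ibc
          else if c = '\\' then goA cs fuel (j + 1) instr inchr true ilc ibc
          else if c = '\'' then goA cs fuel (j + 1) instr false esc ilc ibc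
          else goA cs fuel (j + 1) instr inchr esc ilc ibc
        else if c = '/' ∧ j + 1 < (cs.length : Int) ∧ PySem.List.pyGet? cs (j + 1) = some '/' then
          goA cs fuel (j + 2) instr inchr esc true ibc
        else if c = '/' ∧ j + 1 < (cs.length : Int) ∧ PySem.List.pyGet? cs (j + 1) = some '*' then
          goA cs fuel (j + 2) instr inchr esc ilc true
        else if c = '"' then goA cs fuel (j + 1) true inchr esc ilc ibc
        else if c = '\'' then goA cs fuel (j + 1) instr true esc ilc ibc
        else if c = ';' then j
        else goA cs fuel (j + 1) instr inchr esc ilc ibc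
    else -1

def find_next_semicolon_c_like_py (s : String) (start : Int) : Int :=
  goA s.toList (((s.toList.length : Int) - start).toNat + 1) start false false false false false

-- ===== PORT B =====
-- port of Source B's _skip_quoted
def skipQ (cs : List Char) (fuel : Nat) (j : Int) (q : Char) : Int :=
  match fuel with
  | 0 => j
  | fuel + 1 =>
    if j < (cs.length : Int) then
      match PySem.List.pyGet? cs j with
      | none => j    -- Python raises IndexError here (j < -len); excluded by Pre_
      | some c =>
        if c = '\\' then skipQ cs fuel (j + 2) q
        else if c = q then j + 1
        else skipQ cs fuel (j + 1) q
    else j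

-- port of Source B's _skip_line_comment
def skipLC (cs : List Char) (fuel : Nat) (j : Int) : Int :=
  match fuel with
  | 0 => j + 1
  | fuel + 1 =>
    if j < (cs.length : Int) then
      match PySem.List.pyGet? cs j with
      | none => j + 1   -- Python raises IndexError here (j < -len); excluded by Pre_
      | some c => if c = '\n' then j + 1 else skipLC cs fuel (j + 1)
    else j + 1

-- port of Source B's _skip_block_comment
def skipBC (cs : List Char) (fuel : Nat) (j : Int) : Int :=
  match fuel with
  | 0 => (cs.length : Int)
  | fuel + 1 =>
    if j + 1 < (cs.length : Int) then
      if PySem.List.pyGet? cs j = some '*' ∧ PySem.List.pyGet? cs (j + 1) = some '/' then j + 2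
      else skipBC cs fuel (j + 1)
    else (cs.length : Int)

-- port of Source B's outer loop
def goB (cs : List Char) (fuel : Nat) (j : Int) : Int :=
  match fuel with
  | 0 => -1
  | fuel + 1 =>
    if j < (cs.length : Int) then
      match PySem.List.pyGet? cs j with
      | none => -1   -- Python raises IndexError here (j < -len); excluded by Pre_
      | some c =>
        if c = ';' then j
        else if c = '"' ∨ c = '\'' then
          goB cs fuel (skipQ cs (((cs.length : Int) - (j + 1)).toNat + 1) (j + 1) c)
        else if c = '/' ∧ j + 1 < (cs.length : Int) ∧ PySem.List.pyGet? cs (j + 1) = some '/' then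
          goB cs fuel (skipLC cs (((cs.length : Int) - (j + 2)).toNat + 1) (j + 2))
        else if c = '/' ∧ j + 1 < (cs.length : Int) ∧ PySem.List.pyGet? cs (j + 1) = some '*' then
          goB cs fuel (skipBC cs (((cs.length : Int) - (j + 2)).toNat + 1) (j + 2))
        else goB cs fuel (j + 1)
    else -1

def find_next_semicolon_c_like_py_alt (s : String) (start : Int) : Int :=
  goB s.toList (((s.toList.length : Int) - start).toNat + 1) start

-- ===== PRECONDITION & SPEC =====
-- Pre_ excludes exactly the inputs where A raises IndexError: start < -len(s) makes the
-- very first s[j] access raise (Python negative indexing below -len). A returns on all others.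
def Pre_find_next_semicolon_c_like_py (s : String) (start : Int) : Prop :=
  -(s.toList.length : Int) ≤ start
instance (s : String) (start : Int) : Decidable (Pre_find_next_semicolon_c_like_py s start) := by
  unfold Pre_find_next_semicolon_c_like_py; infer_instance

def pvWitness_find_next_semicolon_c_like_py : String × Int := ("a\"x;\"+b; // c", 0)

def Spec_find_next_semicolon_c_like_py (s : String) (start : Int) (out : Int) : Prop :=
  out = find_next_semicolon_c_like_py_alt s start
instance (s : String) (start : Int) (out : Int) :
    Decidable (Spec_find_next_semicolon_c_like_py s start out) := by
  unfold Spec_find_next_semicolon_c_like_py; infer_instance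

-- ===== CLAIM (what is proved, stated in full; the proofs are below) =====
def Claim_equal_find_next_semicolon_c_like_py : Prop :=
  ∀ (s : String) (start : Int), Dom_find_next_semicolon_c_like_py s start →
    Pre_find_next_semicolon_c_like_py s start →
    Spec_find_next_semicolon_c_like_py s start (find_next_semicolon_c_like_py s start)

-- ===== LEMMAS AND PROOFS =====

-- fuel irrelevance: any fuel above the remaining length computes the same value
set_option maxHeartbeats 1600000 in
theorem goA_fuel (cs : List Char) (f1 f2 : Nat) :
    ∀ (j : Int) (a b c d e : Bool),
      ((cs.length : Int) - j).toNat < f1 → ((cs.length : Int) - j).toNat < f2 →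
      goA cs f1 j a b c d e = goA cs f2 j a b c d e := by
  induction f1 generalizing f2 with
  | zero => intro j a b c d e h1 _; omega
  | succ f ih =>
    intro j a b c d e h1 h2
    cases f2 with
    | zero => omega
    | succ f2 =>
      simp only [goA]
      by_cases hj : j < (cs.length : Int)
      · simp only [hj, if_pos]
        cases hc : PySem.List.pyGet? cs j with
        | none => rfl
        | some c =>
          dsimp only
          split_ifs <;> first | rfl | exact ih f2 _ _ _ _ _ _ (by omega) (by omega)
      · rw [if_neg hj, if_neg hj]

set_option maxHeartbeats 1600000 in
theorem skipQ_fuel (cs : List Char) (f1 f2 : Nat) :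
    ∀ (j : Int) (q : Char),
      ((cs.length : Int) - j).toNat < f1 → ((cs.length : Int) - j).toNat < f2 →
      skipQ cs f1 j q = skipQ cs f2 j q := by
  induction f1 generalizing f2 with
  | zero => intro j q h1 _; omega
  | succ f ih =>
    intro j q h1 h2
    cases f2 with
    | zero => omega
    | succ f2 =>
      simp only [skipQ]
      by_cases hj : j < (cs.length : Int)
      · simp only [hj, if_pos]
        cases hc : PySem.List.pyGet? cs j with
        | none => rfl
        | some c =>
          dsimp only
          split_ifs <;> first | rfl | exact ih f2 _ _ (by omega) (by omega)
      · rw [if_neg hj, if_neg hj]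

set_option maxHeartbeats 1600000 in
theorem skipLC_fuel (cs : List Char) (f1 f2 : Nat) :
    ∀ (j : Int),
      ((cs.length : Int) - j).toNat < f1 → ((cs.length : Int) - j).toNat < f2 →
      skipLC cs f1 j = skipLC cs f2 j := by
  induction f1 generalizing f2 with
  | zero => intro j h1 _; omega
  | succ f ih =>
    intro j h1 h2
    cases f2 with
    | zero => omega
    | succ f2 =>
      simp only [skipLC]
      by_cases hj : j < (cs.length : Int)
      · simp only [hj, if_pos]
        cases hc : PySem.List.pyGet? cs j with
        | none => rfl
        | some c =>
          dsimp only
          split_ifs <;> first | rfl | exact ih f2 _ (by omega) (by omega)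
      · rw [if_neg hj, if_neg hj]

set_option maxHeartbeats 1600000 in
theorem skipBC_fuel (cs : List Char) (f1 f2 : Nat) :
    ∀ (j : Int),
      ((cs.length : Int) - j).toNat < f1 → ((cs.length : Int) - j).toNat < f2 →
      skipBC cs f1 j = skipBC cs f2 j := by
  induction f1 generalizing f2 with
  | zero => intro j h1 _; omega
  | succ f ih =>
    intro j h1 h2
    cases f2 with
    | zero => omega
    | succ f2 =>
      simp only [skipBC]
      by_cases hj : j + 1 < (cs.length : Int)
      · simp only [hj, if_pos]
        split_ifs <;> first | rfl | exact ih f2 _ (by omega) (by omega)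
      · rw [if_neg hj, if_neg hj]

-- canonical-fuel shorthands used by the proofs
def GA (cs : List Char) (j : Int) (a b c d e : Bool) : Int :=
  goA cs (((cs.length : Int) - j).toNat + 1) j a b c d e
def GQ (cs : List Char) (j : Int) (q : Char) : Int :=
  skipQ cs (((cs.length : Int) - j).toNat + 1) j q
def GLC (cs : List Char) (j : Int) : Int :=
  skipLC cs (((cs.length : Int) - j).toNat + 1) j
def GBC (cs : List Char) (j : Int) : Int :=
  skipBC cs (((cs.length : Int) - j).toNat + 1) j

theorem goA_to_GA (cs : List Char) (f : Nat) (j : Int) (a b c d e : Bool)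
    (h : ((cs.length : Int) - j).toNat < f) :
    goA cs f j a b c d e = GA cs j a b c d e :=
  goA_fuel cs f _ j a b c d e h (by omega)

theorem skipQ_to_GQ (cs : List Char) (f : Nat) (j : Int) (q : Char)
    (h : ((cs.length : Int) - j).toNat < f) :
    skipQ cs f j q = GQ cs j q :=
  skipQ_fuel cs f _ j q h (by omega)

theorem skipLC_to_GLC (cs : List Char) (f : Nat) (j : Int)
    (h : ((cs.length : Int) - j).toNat < f) :
    skipLC cs f j = GLC cs j :=
  skipLC_fuel cs f _ j h (by omega)

theorem skipBC_to_GBC (cs : List Char) (f : Nat) (j : Int)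
    (h : ((cs.length : Int) - j).toNat < f) :
    skipBC cs f j = GBC cs j :=
  skipBC_fuel cs f _ j h (by omega)

theorem pyGet?_isSome_of (cs : List Char) (j : Int)
    (h1 : -(cs.length : Int) ≤ j) (h2 : j < (cs.length : Int)) :
    ∃ c, PySem.List.pyGet? cs j = some c := by
  cases hc : PySem.List.pyGet? cs j with
  | some c => exact ⟨c, rfl⟩
  | none =>
    rw [PySem.List.pyGet?_eq_none_iff] at hc
    exact absurd (by constructor <;> omega) hc

-- one-step unfolding of GA, in the shape of A's loop body
theorem GQ_out (cs : List Char) (j : Int) (q : Char) (h : ¬ j < (cs.length : Int)) :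
    GQ cs j q = j := by
  unfold GQ; simp only [skipQ]; simp [h]

theorem GQ_bs (cs : List Char) (j : Int) (q : Char) (hj : j < (cs.length : Int))
    (hc : PySem.List.pyGet? cs j = some '\\') :
    GQ cs j q = GQ cs (j + 2) q := by
  unfold GQ; simp only [skipQ]
  simp only [hj, if_pos, hc, if_true, reduceIte]
  exact skipQ_to_GQ cs _ _ _ (by omega)

theorem GQ_close (cs : List Char) (j : Int) (q : Char) (hj : j < (cs.length : Int))
    (hc : PySem.List.pyGet? cs j = some q) (hq : ¬ q = '\\') :
    GQ cs j q = j + 1 := by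
  unfold GQ; simp only [skipQ]
  simp [hj, hc, hq]

theorem GQ_other (cs : List Char) (j : Int) (q c : Char) (hj : j < (cs.length : Int))
    (hc : PySem.List.pyGet? cs j = some c) (h1 : ¬ c = '\\') (h2 : ¬ c = q) :
    GQ cs j q = GQ cs (j + 1) q := by
  unfold GQ; simp only [skipQ]
  simp only [hj, if_pos, hc, h1, h2, if_false, reduceIte]
  exact skipQ_to_GQ cs _ _ _ (by omega)

theorem GLC_out (cs : List Char) (j : Int) (h : ¬ j < (cs.length : Int)) :
    GLC cs j = j + 1 := by
  unfold GLC; simp only [skipLC]; simp [h]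

theorem GLC_nl (cs : List Char) (j : Int) (hj : j < (cs.length : Int))
    (hc : PySem.List.pyGet? cs j = some '\n') :
    GLC cs j = j + 1 := by
  unfold GLC; simp only [skipLC]; simp [hj, hc]

theorem GLC_other (cs : List Char) (j : Int) (c : Char) (hj : j < (cs.length : Int))
    (hc : PySem.List.pyGet? cs j = some c) (h1 : ¬ c = '\n') :
    GLC cs j = GLC cs (j + 1) := by
  unfold GLC; simp only [skipLC]
  simp only [hj, if_pos, hc, h1, if_false, reduceIte]
  exact skipLC_to_GLC cs _ _ (by omega)

theorem GBC_out (cs : List Char) (j : Int) (h : ¬ j + 1 < (cs.length : Int)) :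
    GBC cs j = (cs.length : Int) := by
  unfold GBC; simp only [skipBC]; simp [h]

theorem GBC_hit (cs : List Char) (j : Int) (hj : j + 1 < (cs.length : Int))
    (hc : PySem.List.pyGet? cs j = some '*' ∧ PySem.List.pyGet? cs (j + 1) = some '/') :
    GBC cs j = j + 2 := by
  unfold GBC; simp only [skipBC]; simp [hj, hc]

theorem GBC_miss (cs : List Char) (j : Int) (hj : j + 1 < (cs.length : Int))
    (hc : ¬ (PySem.List.pyGet? cs j = some '*' ∧ PySem.List.pyGet? cs (j + 1) = some '/')) :
    GBC cs j = GBC cs (j + 1) := by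
  unfold GBC; simp only [skipBC]
  simp only [hj, if_pos, hc, if_false, reduceIte]
  exact skipBC_to_GBC cs _ _ (by omega)

-- lower bounds on the skip helpers (the scan index strictly increases)
set_option maxHeartbeats 1600000 in
theorem GQ_ge (cs : List Char) : ∀ (f : Nat) (j : Int) (q : Char), j ≤ skipQ cs f j q := by
  intro f
  induction f with
  | zero => intro j q; simp [skipQ]
  | succ f ih =>
    intro j q
    simp only [skipQ]
    by_cases hj : j < (cs.length : Int)
    · simp only [hj, if_pos]
      cases hc : PySem.List.pyGet? cs j with
      | none => dsimp only; omega
      | some c =>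
        dsimp only
        split_ifs <;> first | omega | (have := ih (j + 2) q; omega) | (have := ih (j + 1) q; omega)
    · rw [if_neg hj]

set_option maxHeartbeats 1600000 in
theorem GLC_ge (cs : List Char) : ∀ (f : Nat) (j : Int), j + 1 ≤ skipLC cs f j := by
  intro f
  induction f with
  | zero => intro j; simp [skipLC]
  | succ f ih =>
    intro j
    simp only [skipLC]
    by_cases hj : j < (cs.length : Int)
    · simp only [hj, if_pos]
      cases hc : PySem.List.pyGet? cs j with
      | none => dsimp only; omega
      | some c =>
        dsimp only
        split_ifs <;> first | omega | (have := ih (j + 1); omega)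
    · rw [if_neg hj]

set_option maxHeartbeats 1600000 in
theorem GBC_lb (cs : List Char) :
    ∀ (f : Nat) (j : Int), j ≤ skipBC cs f j ∨ skipBC cs f j = (cs.length : Int) := by
  intro f
  induction f with
  | zero => intro j; right; simp [skipBC]
  | succ f ih =>
    intro j
    simp only [skipBC]
    by_cases hj : j + 1 < (cs.length : Int)
    · simp only [hj, if_pos]
      split_ifs
      · left; omega
      · rcases ih (j + 1) with h | h
        · left; omega
        · right; exact h
    · rw [if_neg hj]; right; rfl

set_option maxHeartbeats 1600000 in
theorem goB_fuel (cs : List Char) (f1 f2 : Nat) :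
    ∀ (j : Int),
      ((cs.length : Int) - j).toNat < f1 → ((cs.length : Int) - j).toNat < f2 →
      goB cs f1 j = goB cs f2 j := by
  induction f1 generalizing f2 with
  | zero => intro j h1 _; omega
  | succ f ih =>
    intro j h1 h2
    cases f2 with
    | zero => omega
    | succ f2 =>
      simp only [goB]
      by_cases hj : j < (cs.length : Int)
      · simp only [hj, if_pos]
        cases hc : PySem.List.pyGet? cs j with
        | none => rfl
        | some c =>
          dsimp only
          split_ifs with t1 t2 t3 t4
          · rfl
          · refine ih f2 _ ?_ ?_ <;>
              (have := GQ_ge cs (((cs.length : Int) - (j + 1)).toNat + 1) (j + 1) c; omega)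
          · refine ih f2 _ ?_ ?_ <;>
              (have := GLC_ge cs (((cs.length : Int) - (j + 2)).toNat + 1) (j + 2); omega)
          · refine ih f2 _ ?_ ?_ <;>
              (rcases GBC_lb cs (((cs.length : Int) - (j + 2)).toNat + 1) (j + 2) with hb | hb <;> omega)
          · exact ih f2 _ (by omega) (by omega)
      · rw [if_neg hj, if_neg hj]

def GB (cs : List Char) (j : Int) : Int :=
  goB cs (((cs.length : Int) - j).toNat + 1) j

theorem goB_to_GB (cs : List Char) (f : Nat) (j : Int)
    (h : ((cs.length : Int) - j).toNat < f) :
    goB cs f j = GB cs j :=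
  goB_fuel cs f _ j h (by omega)


-- one-step branch equations for A's loop (literal flag configurations as A's states)
theorem GA_neg (cs : List Char) (j : Int) (a b c d e : Bool) (h : ¬ j < (cs.length : Int)) :
    GA cs j a b c d e = -1 := by
  unfold GA; simp only [goA]; rw [if_neg h]

-- A in string/char mode with escape pending takes one unconditional step
theorem lemEsc (cs : List Char) (j : Int) (instr inchr : Bool)
    (ho : instr = true ∨ inchr = true) (h : -(cs.length : Int) ≤ j) :
    GA cs j instr inchr true false false = GA cs (j + 1) instr inchr false false false := by
  by_cases hj : j < (cs.length : Int)
  · obtain ⟨c, hc⟩ := pyGet?_isSome_of cs j h hj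
    unfold GA
    simp only [goA]
    rcases ho with ho | ho <;> subst ho <;> simp only [hj, if_pos, hc, Bool.false_eq_true,
      reduceIte, if_true] <;> [skip; cases instr] <;>
      first
        | exact goA_to_GA cs _ _ _ _ _ _ _ (by omega)
        | (simp only [Bool.false_eq_true, reduceIte, if_true]
           exact goA_to_GA cs _ _ _ _ _ _ _ (by omega))
  · rw [GA_neg cs j _ _ _ _ _ hj, GA_neg cs (j + 1) _ _ _ _ _ (by omega)]

-- string state (in_str = True)
theorem GA_str_bs (cs : List Char) (j : Int) (hj : j < (cs.length : Int))
    (hc : PySem.List.pyGet? cs j = some '\\') :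
    GA cs j true false false false false = GA cs (j + 1) true false true false false := by
  unfold GA; simp only [goA]
  simp only [hj, if_pos, hc, Bool.false_eq_true, reduceIte, if_true]
  exact goA_to_GA cs _ _ _ _ _ _ _ (by omega)

theorem GA_str_close (cs : List Char) (j : Int) (hj : j < (cs.length : Int))
    (hc : PySem.List.pyGet? cs j = some '"') :
    GA cs j true false false false false = GA cs (j + 1) false false false false false := by
  unfold GA; simp only [goA]
  simp only [hj, if_pos, hc, Bool.false_eq_true, reduceIte, if_true]
  exact goA_to_GA cs _ _ _ _ _ _ _ (by omega)

theorem GA_str_other (cs : List Char) (j : Int) (c : Char) (hj : j < (cs.length : Int))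
    (hc : PySem.List.pyGet? cs j = some c) (h1 : ¬ c = '\\') (h2 : ¬ c = '"') :
    GA cs j true false false false false = GA cs (j + 1) true false false false false := by
  unfold GA; simp only [goA]
  simp only [hj, if_pos, hc, Bool.false_eq_true, reduceIte, if_true, h1, h2, if_false]
  exact goA_to_GA cs _ _ _ _ _ _ _ (by omega)

-- char state (in_chr = True)
theorem GA_chr_bs (cs : List Char) (j : Int) (hj : j < (cs.length : Int))
    (hc : PySem.List.pyGet? cs j = some '\\') :
    GA cs j false true false false false = GA cs (j + 1) false true true false false := by
  unfold GA; simp only [goA]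
  simp only [hj, if_pos, hc, Bool.false_eq_true, reduceIte, if_true]
  exact goA_to_GA cs _ _ _ _ _ _ _ (by omega)

theorem GA_chr_close (cs : List Char) (j : Int) (hj : j < (cs.length : Int))
    (hc : PySem.List.pyGet? cs j = some '\'') :
    GA cs j false true false false false = GA cs (j + 1) false false false false false := by
  unfold GA; simp only [goA]
  simp only [hj, if_pos, hc, Bool.false_eq_true, reduceIte, if_true]
  exact goA_to_GA cs _ _ _ _ _ _ _ (by omega)

theorem GA_chr_other (cs : List Char) (j : Int) (c : Char) (hj : j < (cs.length : Int))
    (hc : PySem.List.pyGet? cs j = some c) (h1 : ¬ c = '\\') (h2 : ¬ c = '\'') :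
    GA cs j false true false false false = GA cs (j + 1) false true false false false := by
  unfold GA; simp only [goA]
  simp only [hj, if_pos, hc, Bool.false_eq_true, reduceIte, if_true, h1, h2, if_false]
  exact goA_to_GA cs _ _ _ _ _ _ _ (by omega)

-- line-comment state
theorem GA_lc_nl (cs : List Char) (j : Int) (hj : j < (cs.length : Int))
    (hc : PySem.List.pyGet? cs j = some '\n') :
    GA cs j false false false true false = GA cs (j + 1) false false false false false := by
  unfold GA; simp only [goA]
  simp only [hj, if_pos, hc, if_true, reduceIte]
  exact goA_to_GA cs _ _ _ _ _ _ _ (by omega)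

theorem GA_lc_other (cs : List Char) (j : Int) (c : Char) (hj : j < (cs.length : Int))
    (hc : PySem.List.pyGet? cs j = some c) (h1 : ¬ c = '\n') :
    GA cs j false false false true false = GA cs (j + 1) false false false true false := by
  unfold GA; simp only [goA]
  simp only [hj, if_pos, hc, if_true, reduceIte]
  simp only [show (!decide (c = '\n')) = true from by simp [h1]]
  exact goA_to_GA cs _ _ _ _ _ _ _ (by omega)

-- block-comment state
theorem GA_bc_hit (cs : List Char) (j : Int) (hj : j < (cs.length : Int))
    (hcond : PySem.List.pyGet? cs j = some '*' ∧ j + 1 < (cs.length : Int) ∧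
      PySem.List.pyGet? cs (j + 1) = some '/') :
    GA cs j false false false false true = GA cs (j + 2) false false false false false := by
  unfold GA; simp only [goA]
  simp only [hj, if_pos, hcond.1, Bool.false_eq_true, reduceIte, if_true]
  simp only [show ('*' = '*' ∧ j + 1 < (cs.length : Int) ∧
      PySem.List.pyGet? cs (j + 1) = some '/') from ⟨rfl, hcond.2⟩, if_true]
  exact goA_to_GA cs _ _ _ _ _ _ _ (by omega)

theorem GA_bc_miss (cs : List Char) (j : Int) (c : Char) (hj : j < (cs.length : Int))
    (hc : PySem.List.pyGet? cs j = some c)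
    (hcond : ¬ (c = '*' ∧ j + 1 < (cs.length : Int) ∧
      PySem.List.pyGet? cs (j + 1) = some '/')) :
    GA cs j false false false false true = GA cs (j + 1) false false false false true := by
  unfold GA; simp only [goA]
  simp only [hj, if_pos, hc, Bool.false_eq_true, reduceIte, if_true, hcond, if_false]
  exact goA_to_GA cs _ _ _ _ _ _ _ (by omega)

-- top-level state (all flags false)
theorem GA_top_semi (cs : List Char) (j : Int) (hj : j < (cs.length : Int))
    (hc : PySem.List.pyGet? cs j = some ';') :
    GA cs j false false false false false = j := by
  unfold GA; simp only [goA]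
  simp [hj, hc]

theorem GA_top_lc (cs : List Char) (j : Int) (hj : j < (cs.length : Int))
    (hc : PySem.List.pyGet? cs j = some '/')
    (hcond : j + 1 < (cs.length : Int) ∧ PySem.List.pyGet? cs (j + 1) = some '/') :
    GA cs j false false false false false = GA cs (j + 2) false false false true false := by
  unfold GA; simp only [goA]
  simp only [hj, if_pos, hc, Bool.false_eq_true, reduceIte]
  simp only [show ('/' = '/' ∧ j + 1 < (cs.length : Int) ∧
      PySem.List.pyGet? cs (j + 1) = some '/') from ⟨rfl, hcond⟩, if_true]
  exact goA_to_GA cs _ _ _ _ _ _ _ (by omega)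

theorem GA_top_bc (cs : List Char) (j : Int) (hj : j < (cs.length : Int))
    (hc : PySem.List.pyGet? cs j = some '/')
    (hlc : ¬ ('/' = '/' ∧ j + 1 < (cs.length : Int) ∧ PySem.List.pyGet? cs (j + 1) = some '/'))
    (hcond : j + 1 < (cs.length : Int) ∧ PySem.List.pyGet? cs (j + 1) = some '*') :
    GA cs j false false false false false = GA cs (j + 2) false false false false true := by
  unfold GA; simp only [goA]
  simp only [hj, if_pos, hc, Bool.false_eq_true, reduceIte, hlc, if_false]
  simp only [show ('/' = '/' ∧ j + 1 < (cs.length : Int) ∧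
      PySem.List.pyGet? cs (j + 1) = some '*') from ⟨rfl, hcond⟩, if_true]
  exact goA_to_GA cs _ _ _ _ _ _ _ (by omega)

theorem GA_top_dq (cs : List Char) (j : Int) (hj : j < (cs.length : Int))
    (hc : PySem.List.pyGet? cs j = some '"') :
    GA cs j false false false false false = GA cs (j + 1) true false false false false := by
  unfold GA; simp only [goA]
  simp only [hj, if_pos, hc, Bool.false_eq_true, reduceIte]
  have h1 : ¬('"' = '/' ∧ j + 1 < (cs.length : Int) ∧
      PySem.List.pyGet? cs (j + 1) = some '/') := by rintro ⟨h1, -⟩; exact absurd h1 (by decide)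
  have h2 : ¬('"' = '/' ∧ j + 1 < (cs.length : Int) ∧
      PySem.List.pyGet? cs (j + 1) = some '*') := by rintro ⟨h1, -⟩; exact absurd h1 (by decide)
  simp only [h1, h2, if_false, if_pos rfl, reduceIte]
  exact goA_to_GA cs _ _ _ _ _ _ _ (by omega)

theorem GA_top_sq (cs : List Char) (j : Int) (hj : j < (cs.length : Int))
    (hc : PySem.List.pyGet? cs j = some '\'') :
    GA cs j false false false false false = GA cs (j + 1) false true false false false := by
  unfold GA; simp only [goA]
  simp only [hj, if_pos, hc, Bool.false_eq_true, reduceIte]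
  have h1 : ¬('\'' = '/' ∧ j + 1 < (cs.length : Int) ∧
      PySem.List.pyGet? cs (j + 1) = some '/') := by rintro ⟨h1, -⟩; exact absurd h1 (by decide)
  have h2 : ¬('\'' = '/' ∧ j + 1 < (cs.length : Int) ∧
      PySem.List.pyGet? cs (j + 1) = some '*') := by rintro ⟨h1, -⟩; exact absurd h1 (by decide)
  simp only [h1, h2, if_false, if_neg (show ¬('\'' = '"') from by decide), if_pos rfl, reduceIte]
  exact goA_to_GA cs _ _ _ _ _ _ _ (by omega)

theorem GA_top_other (cs : List Char) (j : Int) (c : Char) (hj : j < (cs.length : Int))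
    (hc : PySem.List.pyGet? cs j = some c)
    (hlc : ¬ (c = '/' ∧ j + 1 < (cs.length : Int) ∧ PySem.List.pyGet? cs (j + 1) = some '/'))
    (hbc : ¬ (c = '/' ∧ j + 1 < (cs.length : Int) ∧ PySem.List.pyGet? cs (j + 1) = some '*'))
    (hdq : ¬ c = '"') (hsq : ¬ c = '\'') (hsemi : ¬ c = ';') :
    GA cs j false false false false false = GA cs (j + 1) false false false false false := by
  unfold GA; simp only [goA]
  simp only [hj, if_pos, hc, Bool.false_eq_true, reduceIte, hlc, hbc, hdq, hsq, hsemi, if_false]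
  exact goA_to_GA cs _ _ _ _ _ _ _ (by omega)

-- one-step branch equations for B's outer loop
theorem GB_neg (cs : List Char) (j : Int) (h : ¬ j < (cs.length : Int)) :
    GB cs j = -1 := by
  unfold GB; simp only [goB]; rw [if_neg h]

theorem GB_semi (cs : List Char) (j : Int) (hj : j < (cs.length : Int))
    (hc : PySem.List.pyGet? cs j = some ';') :
    GB cs j = j := by
  unfold GB; simp only [goB]; simp [hj, hc]

theorem GB_quote (cs : List Char) (j : Int) (c : Char) (hj : j < (cs.length : Int))
    (hc : PySem.List.pyGet? cs j = some c) (hsemi : ¬ c = ';') (hq : c = '"' ∨ c = '\'') :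
    GB cs j = GB cs (GQ cs (j + 1) c) := by
  unfold GB; simp only [goB]
  simp only [hj, if_pos, hc, hsemi, if_false, hq, if_true, reduceIte]
  refine goB_to_GB cs _ _ ?_
  have := GQ_ge cs (((cs.length : Int) - (j + 1)).toNat + 1) (j + 1) c
  omega

theorem GB_lc (cs : List Char) (j : Int) (c : Char) (hj : j < (cs.length : Int))
    (hc : PySem.List.pyGet? cs j = some c) (hsemi : ¬ c = ';') (hq : ¬ (c = '"' ∨ c = '\''))
    (hlc : c = '/' ∧ j + 1 < (cs.length : Int) ∧ PySem.List.pyGet? cs (j + 1) = some '/') :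
    GB cs j = GB cs (GLC cs (j + 2)) := by
  unfold GB; simp only [goB]
  simp only [hj, if_pos, hc, hsemi, hq, if_false, hlc, if_true, reduceIte]
  refine goB_to_GB cs _ _ ?_
  have := GLC_ge cs (((cs.length : Int) - (j + 2)).toNat + 1) (j + 2)
  omega

theorem GB_bc (cs : List Char) (j : Int) (c : Char) (hj : j < (cs.length : Int))
    (hc : PySem.List.pyGet? cs j = some c) (hsemi : ¬ c = ';') (hq : ¬ (c = '"' ∨ c = '\''))
    (hlc : ¬ (c = '/' ∧ j + 1 < (cs.length : Int) ∧ PySem.List.pyGet? cs (j + 1) = some '/'))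
    (hbc : c = '/' ∧ j + 1 < (cs.length : Int) ∧ PySem.List.pyGet? cs (j + 1) = some '*') :
    GB cs j = GB cs (GBC cs (j + 2)) := by
  unfold GB; simp only [goB]
  simp only [hj, if_pos, hc, hsemi, hq, hlc, if_false, hbc, if_true, reduceIte]
  refine goB_to_GB cs _ _ ?_
  rcases GBC_lb cs (((cs.length : Int) - (j + 2)).toNat + 1) (j + 2) with hb | hb <;> omega

theorem GB_other (cs : List Char) (j : Int) (c : Char) (hj : j < (cs.length : Int))
    (hc : PySem.List.pyGet? cs j = some c) (hsemi : ¬ c = ';') (hq : ¬ (c = '"' ∨ c = '\''))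
    (hlc : ¬ (c = '/' ∧ j + 1 < (cs.length : Int) ∧ PySem.List.pyGet? cs (j + 1) = some '/'))
    (hbc : ¬ (c = '/' ∧ j + 1 < (cs.length : Int) ∧ PySem.List.pyGet? cs (j + 1) = some '*')) :
    GB cs j = GB cs (j + 1) := by
  unfold GB; simp only [goB]
  simp only [hj, if_pos, hc, hsemi, hq, hlc, hbc, if_false, reduceIte]
  exact goB_to_GB cs _ _ (by omega)

-- A's string-scanning state equals B's _skip_quoted jump
theorem lemStr (cs : List Char) (j : Int) (h : -(cs.length : Int) ≤ j) :
    GA cs j true false false false false = GA cs (GQ cs j '"') false false false false false := by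
  by_cases hj : j < (cs.length : Int)
  · obtain ⟨c, hc⟩ := pyGet?_isSome_of cs j h hj
    by_cases hbs : c = '\\'
    · subst hbs
      rw [GQ_bs cs j '"' hj hc, GA_str_bs cs j hj hc,
          lemEsc cs (j + 1) true false (Or.inl rfl) (by omega),
          show j + 1 + 1 = j + 2 from by ring]
      exact lemStr cs (j + 2) (by omega)
    · by_cases hq : c = '"'
      · subst hq
        rw [GQ_close cs j '"' hj hc (by decide), GA_str_close cs j hj hc]
      · rw [GQ_other cs j '"' c hj hc hbs hq, GA_str_other cs j c hj hc hbs hq]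
        exact lemStr cs (j + 1) (by omega)
  · rw [GQ_out cs j '"' hj, GA_neg cs j _ _ _ _ _ hj, GA_neg cs j _ _ _ _ _ hj]
termination_by ((cs.length : Int) - j).toNat
decreasing_by all_goals omega

-- A's char-scanning state equals B's _skip_quoted jump
theorem lemChr (cs : List Char) (j : Int) (h : -(cs.length : Int) ≤ j) :
    GA cs j false true false false false = GA cs (GQ cs j '\'') false false false false false := by
  by_cases hj : j < (cs.length : Int)
  · obtain ⟨c, hc⟩ := pyGet?_isSome_of cs j h hj
    by_cases hbs : c = '\\'
    · subst hbs
      rw [GQ_bs cs j '\'' hj hc, GA_chr_bs cs j hj hc,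
          lemEsc cs (j + 1) false true (Or.inr rfl) (by omega),
          show j + 1 + 1 = j + 2 from by ring]
      exact lemChr cs (j + 2) (by omega)
    · by_cases hq : c = '\''
      · subst hq
        rw [GQ_close cs j '\'' hj hc (by decide), GA_chr_close cs j hj hc]
      · rw [GQ_other cs j '\'' c hj hc hbs hq, GA_chr_other cs j c hj hc hbs hq]
        exact lemChr cs (j + 1) (by omega)
  · rw [GQ_out cs j '\'' hj, GA_neg cs j _ _ _ _ _ hj, GA_neg cs j _ _ _ _ _ hj]
termination_by ((cs.length : Int) - j).toNat
decreasing_by all_goals omega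

-- A's line-comment state equals B's _skip_line_comment jump
theorem lemLC (cs : List Char) (j : Int) (h : -(cs.length : Int) ≤ j) :
    GA cs j false false false true false = GA cs (GLC cs j) false false false false false := by
  by_cases hj : j < (cs.length : Int)
  · obtain ⟨c, hc⟩ := pyGet?_isSome_of cs j h hj
    by_cases hnl : c = '\n'
    · subst hnl
      rw [GLC_nl cs j hj hc, GA_lc_nl cs j hj hc]
    · rw [GLC_other cs j c hj hc hnl, GA_lc_other cs j c hj hc hnl]
      exact lemLC cs (j + 1) (by omega)
  · rw [GLC_out cs j hj, GA_neg cs j _ _ _ _ _ hj, GA_neg cs (j + 1) _ _ _ _ _ (by omega)]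
termination_by ((cs.length : Int) - j).toNat
decreasing_by all_goals omega

-- A's block-comment state equals B's _skip_block_comment jump
theorem lemBC (cs : List Char) (j : Int) (h : -(cs.length : Int) ≤ j) :
    GA cs j false false false false true = GA cs (GBC cs j) false false false false false := by
  by_cases hj1 : j + 1 < (cs.length : Int)
  · by_cases hstar : PySem.List.pyGet? cs j = some '*' ∧ PySem.List.pyGet? cs (j + 1) = some '/'
    · rw [GBC_hit cs j hj1 hstar,
          GA_bc_hit cs j (by omega) ⟨hstar.1, hj1, hstar.2⟩]
    · rw [GBC_miss cs j hj1 hstar]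
      have hj : j < (cs.length : Int) := by omega
      obtain ⟨c, hc⟩ := pyGet?_isSome_of cs j h hj
      have hcond : ¬(c = '*' ∧ j + 1 < (cs.length : Int) ∧
          PySem.List.pyGet? cs (j + 1) = some '/') := by
        rintro ⟨h1, _, h3⟩
        exact hstar ⟨by rw [← h1]; exact hc, h3⟩
      rw [GA_bc_miss cs j c hj hc hcond]
      exact lemBC cs (j + 1) (by omega)
  · rw [GBC_out cs j hj1, GA_neg cs ((cs.length : Int)) _ _ _ _ _ (by omega)]
    by_cases hj : j < (cs.length : Int)
    · obtain ⟨c, hc⟩ := pyGet?_isSome_of cs j h hj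
      have hcond : ¬(c = '*' ∧ j + 1 < (cs.length : Int) ∧
          PySem.List.pyGet? cs (j + 1) = some '/') := by rintro ⟨_, h2, _⟩; omega
      rw [GA_bc_miss cs j c hj hc hcond, GA_neg cs (j + 1) _ _ _ _ _ (by omega)]
    · rw [GA_neg cs j _ _ _ _ _ hj]
termination_by ((cs.length : Int) - j).toNat
decreasing_by all_goals omega

-- the main simulation: A's all-false top-level state equals B's tokenizer loop
theorem goA_eq_goB (cs : List Char) (j : Int) (h : -(cs.length : Int) ≤ j) :
    GA cs j false false false false false = GB cs j := by
  by_cases hj : j < (cs.length : Int)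
  · obtain ⟨c, hc⟩ := pyGet?_isSome_of cs j h hj
    by_cases hsemi : c = ';'
    · subst hsemi
      rw [GB_semi cs j hj hc, GA_top_semi cs j hj hc]
    · by_cases hq : c = '"' ∨ c = '\''
      · rw [GB_quote cs j c hj hc hsemi hq]
        have hb : -(cs.length : Int) ≤ GQ cs (j + 1) c := by
          have := GQ_ge cs (((cs.length : Int) - (j + 1)).toNat + 1) (j + 1) c
          unfold GQ; omega
        rcases hq with rfl | rfl
        · rw [GA_top_dq cs j hj hc, lemStr cs (j + 1) (by omega)]
          exact goA_eq_goB cs (GQ cs (j + 1) '"') hb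
        · rw [GA_top_sq cs j hj hc, lemChr cs (j + 1) (by omega)]
          exact goA_eq_goB cs (GQ cs (j + 1) '\'') hb
      · by_cases hlc : c = '/' ∧ j + 1 < (cs.length : Int) ∧
            PySem.List.pyGet? cs (j + 1) = some '/'
        · rw [GB_lc cs j c hj hc hsemi hq hlc]
          obtain ⟨rfl, hlc2⟩ := hlc
          rw [GA_top_lc cs j hj hc hlc2, lemLC cs (j + 2) (by omega)]
          refine goA_eq_goB cs (GLC cs (j + 2)) ?_
          have := GLC_ge cs (((cs.length : Int) - (j + 2)).toNat + 1) (j + 2)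
          unfold GLC; omega
        · by_cases hbc : c = '/' ∧ j + 1 < (cs.length : Int) ∧
              PySem.List.pyGet? cs (j + 1) = some '*'
          · rw [GB_bc cs j c hj hc hsemi hq hlc hbc]
            obtain ⟨rfl, hbc2⟩ := hbc
            rw [GA_top_bc cs j hj hc hlc hbc2, lemBC cs (j + 2) (by omega)]
            refine goA_eq_goB cs (GBC cs (j + 2)) ?_
            rcases GBC_lb cs (((cs.length : Int) - (j + 2)).toNat + 1) (j + 2) with hb | hb <;>
              (unfold GBC; omega)
          · rw [GB_other cs j c hj hc hsemi hq hlc hbc]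
            rw [GA_top_other cs j c hj hc hlc hbc (fun hh => hq (Or.inl hh))
              (fun hh => hq (Or.inr hh)) hsemi]
            exact goA_eq_goB cs (j + 1) (by omega)
  · rw [GA_neg cs j _ _ _ _ _ hj, GB_neg cs j hj]
termination_by ((cs.length : Int) - j).toNat
decreasing_by
  · have := GQ_ge cs (((cs.length : Int) - (j + 1)).toNat + 1) (j + 1) '"'
    unfold GQ at *; omega
  · have := GQ_ge cs (((cs.length : Int) - (j + 1)).toNat + 1) (j + 1) '\''
    unfold GQ at *; omega
  · have := GLC_ge cs (((cs.length : Int) - (j + 2)).toNat + 1) (j + 2)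
    unfold GLC at *; omega
  · rcases GBC_lb cs (((cs.length : Int) - (j + 2)).toNat + 1) (j + 2) with hb | hb <;>
      (unfold GBC at *; omega)
  · omega

theorem find_next_semicolon_c_like_py_spec : Claim_equal_find_next_semicolon_c_like_py := by
  intro s start _ hpre
  unfold Spec_find_next_semicolon_c_like_py find_next_semicolon_c_like_py
    find_next_semicolon_c_like_py_alt
  exact goA_eq_goB s.toList start hpre
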